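-- pv_equiv track=rewrite | github.com/dliang5299/AI-Anti-Poverty-Assistant | UI/utils.py | get_quick_replies
-- ===== SOURCE A (Python) =====
-- from typing import List, Dict, Any
--
-- def get_quick_replies(prompt: str, response: str, conversation_history: List[Dict]) -> List[str]:
--     """
--     Generate contextual quick reply suggestions.
--
--     Args:
--         prompt: User's current message
--         response: Bot's response
--         conversation_history: Previous messages
--
--     Returns:
--         List of quick reply suggestions
--     """
--     prompt_lower = prompt.lower()
--     response_lower = response.lower()
--
--     # Job loss related quick replies
--     if any(keyword in prompt_lower for keyword in ['job', 'unemployment', 'lost', 'fired']):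
--         return [
--             "Tell me about UI benefits",
--             "How do I apply for CalFresh?",
--             "What documents do I need?",
--             "Check Medi-Cal eligibility"
--         ]
--
--     # Healthcare related quick replies
--     elif any(keyword in prompt_lower for keyword in ['health', 'medical', 'medi-cal', 'insurance']):
--         return [
--             "Check Medi-Cal eligibility",
--             "What does Medi-Cal cover?",
--             "How to apply for Medi-Cal?",
--             "Tell me about Covered California"
--         ]
--
--     # Food assistance related quick replies
--     elif any(keyword in prompt_lower for keyword in ['food', 'calfresh', 'hungry', 'groceries']):
--         return [
--             "Check CalFresh eligibility",
--             "How much can I get?",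
--             "Where can I apply?",
--             "What can I buy with CalFresh?"
--         ]
--
--     # Housing related quick replies
--     elif any(keyword in prompt_lower for keyword in ['housing', 'rent', 'homeless', 'shelter']):
--         return [
--             "Risk of eviction",
--             "Currently homeless",
--             "Need rent help",
--             "Find emergency shelter"
--         ]
--
--     # Cash assistance related quick replies
--     elif any(keyword in prompt_lower for keyword in ['cash', 'money', 'calworks', 'benefits']):
--         return [
--             "Tell me about CalWORKs",
--             "Check eligibility",
--             "How to apply?",
--             "What documents needed?"
--         ]
--
--     # General quick replies
--     else:
--         return [
--             "I lost my job",
--             "Need healthcare",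
--             "Need food assistance",
--             "Housing help"
--         ]
-- ===== SOURCE B (Python) =====
-- # Single keyword->category map; pick the highest-priority (lowest-index) matched
-- # category with one min() over all matched keywords, then index a reply table.
--
-- KEYWORD_CATEGORY = {
--     'job': 0, 'unemployment': 0, 'lost': 0, 'fired': 0,
--     'health': 1, 'medical': 1, 'medi-cal': 1, 'insurance': 1,
--     'food': 2, 'calfresh': 2, 'hungry': 2, 'groceries': 2,
--     'housing': 3, 'rent': 3, 'homeless': 3, 'shelter': 3,
--     'cash': 4, 'money': 4, 'calworks': 4, 'benefits': 4,
-- }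
--
-- REPLIES = [
--     ["Tell me about UI benefits", "How do I apply for CalFresh?",
--      "What documents do I need?", "Check Medi-Cal eligibility"],
--     ["Check Medi-Cal eligibility", "What does Medi-Cal cover?",
--      "How to apply for Medi-Cal?", "Tell me about Covered California"],
--     ["Check CalFresh eligibility", "How much can I get?",
--      "Where can I apply?", "What can I buy with CalFresh?"],
--     ["Risk of eviction", "Currently homeless",
--      "Need rent help", "Find emergency shelter"],
--     ["Tell me about CalWORKs", "Check eligibility",
--      "How to apply?", "What documents needed?"],
--     ["I lost my job", "Need healthcare", "Need food assistance", "Housing help"],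
-- ]
--
-- def get_quick_replies(prompt, response, conversation_history):
--     pl = prompt.lower()
--     m = min((cat for kw, cat in KEYWORD_CATEGORY.items() if kw in pl), default=None)
--     return REPLIES[m] if m is not None else REPLIES[-1]
-- ===== Notes on version B (the rewrite author's own statement) =====
-- stated objective: alternative
-- what changed: Replaced the five if/elif per-category any() checks by a single flat keyword-to-category dict: B filters that dict for keywords contained in the lowered prompt and indexes a reply table with the minimum matched category index (default = general replies), instead of short-circuiting branch by branch.
import Mathlib
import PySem

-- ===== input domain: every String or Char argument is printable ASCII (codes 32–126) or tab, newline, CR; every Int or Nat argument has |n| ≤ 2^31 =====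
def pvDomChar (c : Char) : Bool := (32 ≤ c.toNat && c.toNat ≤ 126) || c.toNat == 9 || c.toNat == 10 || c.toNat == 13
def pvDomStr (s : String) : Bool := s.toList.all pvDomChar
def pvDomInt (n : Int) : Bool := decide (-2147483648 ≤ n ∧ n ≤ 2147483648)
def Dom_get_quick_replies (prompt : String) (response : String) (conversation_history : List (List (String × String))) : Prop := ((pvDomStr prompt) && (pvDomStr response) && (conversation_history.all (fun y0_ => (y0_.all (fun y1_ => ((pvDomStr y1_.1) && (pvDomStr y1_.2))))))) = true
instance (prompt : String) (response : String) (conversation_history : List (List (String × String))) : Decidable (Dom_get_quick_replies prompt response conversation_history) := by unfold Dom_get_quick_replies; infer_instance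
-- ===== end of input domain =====

-- B replaces A's per-category if/elif chain by one flat keyword→category map: it collects the
-- categories of all matching keywords and returns the replies of the minimal one; objective: alternative.


-- ===== PORT A =====
def get_quick_replies (prompt : String) (response : String) (_conversation_history : List (List (String × String))) : List String :=
  let prompt_lower := PySem.Str.lower prompt
  let _response_lower := PySem.Str.lower response  -- response_lower is computed and unused in A
  if (["job", "unemployment", "lost", "fired"].any (fun k => PySem.Str.isIn k prompt_lower)) then
    ["Tell me about UI benefits", "How do I apply for CalFresh?",
     "What documents do I need?", "Check Medi-Cal eligibility"]
  else if (["health", "medical", "medi-cal", "insurance"].any (fun k => PySem.Str.isIn k prompt_lower)) then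
    ["Check Medi-Cal eligibility", "What does Medi-Cal cover?",
     "How to apply for Medi-Cal?", "Tell me about Covered California"]
  else if (["food", "calfresh", "hungry", "groceries"].any (fun k => PySem.Str.isIn k prompt_lower)) then
    ["Check CalFresh eligibility", "How much can I get?",
     "Where can I apply?", "What can I buy with CalFresh?"]
  else if (["housing", "rent", "homeless", "shelter"].any (fun k => PySem.Str.isIn k prompt_lower)) then
    ["Risk of eviction", "Currently homeless",
     "Need rent help", "Find emergency shelter"]
  else if (["cash", "money", "calworks", "benefits"].any (fun k => PySem.Str.isIn k prompt_lower)) then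
    ["Tell me about CalWORKs", "Check eligibility",
     "How to apply?", "What documents needed?"]
  else
    ["I lost my job", "Need healthcare", "Need food assistance", "Housing help"]

-- ===== PORT B =====
-- KEYWORD_CATEGORY : one flat dict mapping every keyword to its category index
def kwCategory : PySem.Dict String Int :=
  PySem.Dict.ofList
    [("job", 0), ("unemployment", 0), ("lost", 0), ("fired", 0),
     ("health", 1), ("medical", 1), ("medi-cal", 1), ("insurance", 1),
     ("food", 2), ("calfresh", 2), ("hungry", 2), ("groceries", 2),
     ("housing", 3), ("rent", 3), ("homeless", 3), ("shelter", 3),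
     ("cash", 4), ("money", 4), ("calworks", 4), ("benefits", 4)]

-- REPLIES : the five category reply lists, general replies last
def qrReplies : List (List String) :=
  [["Tell me about UI benefits", "How do I apply for CalFresh?",
    "What documents do I need?", "Check Medi-Cal eligibility"],
   ["Check Medi-Cal eligibility", "What does Medi-Cal cover?",
    "How to apply for Medi-Cal?", "Tell me about Covered California"],
   ["Check CalFresh eligibility", "How much can I get?",
    "Where can I apply?", "What can I buy with CalFresh?"],
   ["Risk of eviction", "Currently homeless",
    "Need rent help", "Find emergency shelter"],
   ["Tell me about CalWORKs", "Check eligibility",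
    "How to apply?", "What documents needed?"],
   ["I lost my job", "Need healthcare", "Need food assistance", "Housing help"]]

def get_quick_replies_alt (prompt : String) (_response : String) (_conversation_history : List (List (String × String))) : List String :=
  let pl := PySem.Str.lower prompt
  -- m = min((cat for kw, cat in KEYWORD_CATEGORY.items() if kw in pl), default=None)
  let matched := (kwCategory.items.filter (fun p => PySem.Str.isIn p.1 pl)).map (fun p => p.2)
  match PySem.List.min? matched (fun x => x) with
  | some m => (PySem.List.pyGet? qrReplies m).getD []     -- REPLIES[m]; m is always in range
  | none   => (PySem.List.pyGet? qrReplies (-1)).getD []  -- REPLIES[-1]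

-- ===== PRECONDITION & SPEC =====
def Spec_get_quick_replies (prompt : String) (response : String) (conversation_history : List (List (String × String))) (out : List String) : Prop := out = get_quick_replies_alt prompt response conversation_history
instance (prompt : String) (response : String) (conversation_history : List (List (String × String))) (out : List String) : Decidable (Spec_get_quick_replies prompt response conversation_history out) := by unfold Spec_get_quick_replies; infer_instance

-- ===== CLAIM (what is proved, stated in full; the proofs are below) =====
def Claim_equal_get_quick_replies : Prop := ∀ (prompt : String) (response : String) (conversation_history : List (List (String × String))), Dom_get_quick_replies prompt response conversation_history → Spec_get_quick_replies prompt response conversation_history (get_quick_replies prompt response conversation_history)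

-- ===== LEMMAS AND PROOFS =====

-- one category's keyword block contributes a run of copies of its index to the matched list
theorem filterMap_cat (q : String × Int → Bool) (c : Int) (kws : List String) (l : List (String × Int)) :
    (((kws.map (fun k => (k, c))) ++ l).filter q).map (fun p => p.2) =
      List.replicate (kws.countP (fun k => q (k, c))) c ++ (l.filter q).map (fun p => p.2) := by
  induction kws with
  | nil => simp
  | cons k t ih =>
    simp only [List.map_cons, List.cons_append, List.filter_cons, List.countP_cons]
    by_cases h : q (k, c) = true
    · simp only [h, if_true, List.map_cons, ih, List.replicate_succ, List.cons_append]
    · rw [Bool.not_eq_true] at h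
      simp only [h, Bool.false_eq_true, if_false, ih, Nat.add_zero]

theorem countP_ne_zero_of_any {q : String → Bool} {kws : List String}
    (h : kws.any q = true) : kws.countP q ≠ 0 := by
  intro hz
  obtain ⟨a, ha, hqa⟩ := List.any_eq_true.mp h
  exact (List.countP_eq_zero.mp hz a ha) hqa

theorem countP_zero_of_any_false {q : String → Bool} {kws : List String}
    (h : kws.any q = false) : kws.countP q = 0 :=
  List.countP_eq_zero.mpr (List.any_eq_false.mp h)

theorem foldl_min_eq (a : Int) (l : List Int) (h : ∀ x ∈ l, a ≤ x) : l.foldl min a = a := by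
  induction l generalizing a with
  | nil => rfl
  | cons x t ih =>
    have hax : a ≤ x := h x (by simp)
    simp only [List.foldl_cons, min_eq_left hax]
    exact ih a (fun y hy => h y (by simp [hy]))

-- Python's min keeps the first minimum; with a minimal head it is the head
theorem min?_of_head_min (a : Int) (l : List Int) (h : ∀ x ∈ l, a ≤ x) :
    PySem.List.min? (a :: l) (fun x => x) = some a := by
  rw [PySem.List.min?_id_cons, foldl_min_eq a l h]

-- the dict's items, grouped per category block (keys are distinct, so items = the insertion list)
theorem kwCategory_items :
    kwCategory.items =
      (["job", "unemployment", "lost", "fired"].map (fun k => (k, (0 : Int)))) ++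
      ((["health", "medical", "medi-cal", "insurance"].map (fun k => (k, (1 : Int)))) ++
      ((["food", "calfresh", "hungry", "groceries"].map (fun k => (k, (2 : Int)))) ++
      ((["housing", "rent", "homeless", "shelter"].map (fun k => (k, (3 : Int)))) ++
      ((["cash", "money", "calworks", "benefits"].map (fun k => (k, (4 : Int)))) ++ [])))) := by
  decide

-- ===== VERDICT (by name: the statement is the Claim_ definition above) =====
theorem get_quick_replies_spec : Claim_equal_get_quick_replies := by
  intro prompt response conversation_history _
  unfold Spec_get_quick_replies
  simp only [get_quick_replies, get_quick_replies_alt]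
  rw [kwCategory_items]
  simp only [filterMap_cat]
  simp only [List.filter_nil, List.map_nil]
  by_cases h0 : (["job", "unemployment", "lost", "fired"].any
      (fun k => PySem.Str.isIn k (PySem.Str.lower prompt))) = true
  · have hne := countP_ne_zero_of_any h0
    obtain ⟨m, hm⟩ := Nat.exists_eq_succ_of_ne_zero hne
    rw [hm, List.replicate_succ, List.cons_append, min?_of_head_min 0, if_pos h0]
    · decide
    · intro x hx
      simp only [List.mem_append, List.mem_replicate, List.not_mem_nil, or_false] at hx
      rcases hx with ⟨-,h⟩|⟨-,h⟩|⟨-,h⟩|⟨-,h⟩|⟨-,h⟩ <;> omega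
  · have h0' := h0; rw [Bool.not_eq_true] at h0'
    rw [countP_zero_of_any_false h0', List.replicate_zero, List.nil_append, if_neg h0]
    by_cases h1 : (["health", "medical", "medi-cal", "insurance"].any
        (fun k => PySem.Str.isIn k (PySem.Str.lower prompt))) = true
    · have hne := countP_ne_zero_of_any h1
      obtain ⟨m, hm⟩ := Nat.exists_eq_succ_of_ne_zero hne
      rw [hm, List.replicate_succ, List.cons_append, min?_of_head_min 1, if_pos h1]
      · decide
      · intro x hx
        simp only [List.mem_append, List.mem_replicate, List.not_mem_nil, or_false] at hx
        rcases hx with ⟨-,h⟩|⟨-,h⟩|⟨-,h⟩|⟨-,h⟩ <;> omega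
    · have h1' := h1; rw [Bool.not_eq_true] at h1'
      rw [countP_zero_of_any_false h1', List.replicate_zero, List.nil_append, if_neg h1]
      by_cases h2 : (["food", "calfresh", "hungry", "groceries"].any
          (fun k => PySem.Str.isIn k (PySem.Str.lower prompt))) = true
      · have hne := countP_ne_zero_of_any h2
        obtain ⟨m, hm⟩ := Nat.exists_eq_succ_of_ne_zero hne
        rw [hm, List.replicate_succ, List.cons_append, min?_of_head_min 2, if_pos h2]
        · decide
        · intro x hx
          simp only [List.mem_append, List.mem_replicate, List.not_mem_nil, or_false] at hx
          rcases hx with ⟨-,h⟩|⟨-,h⟩|⟨-,h⟩ <;> omega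
      · have h2' := h2; rw [Bool.not_eq_true] at h2'
        rw [countP_zero_of_any_false h2', List.replicate_zero, List.nil_append, if_neg h2]
        by_cases h3 : (["housing", "rent", "homeless", "shelter"].any
            (fun k => PySem.Str.isIn k (PySem.Str.lower prompt))) = true
        · have hne := countP_ne_zero_of_any h3
          obtain ⟨m, hm⟩ := Nat.exists_eq_succ_of_ne_zero hne
          rw [hm, List.replicate_succ, List.cons_append, min?_of_head_min 3, if_pos h3]
          · decide
          · intro x hx
            simp only [List.mem_append, List.mem_replicate, List.not_mem_nil, or_false] at hx
            rcases hx with ⟨-,h⟩|⟨-,h⟩ <;> omega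
        · have h3' := h3; rw [Bool.not_eq_true] at h3'
          rw [countP_zero_of_any_false h3', List.replicate_zero, List.nil_append, if_neg h3]
          by_cases h4 : (["cash", "money", "calworks", "benefits"].any
              (fun k => PySem.Str.isIn k (PySem.Str.lower prompt))) = true
          · have hne := countP_ne_zero_of_any h4
            obtain ⟨m, hm⟩ := Nat.exists_eq_succ_of_ne_zero hne
            rw [hm, List.replicate_succ, List.cons_append, min?_of_head_min 4, if_pos h4]
            · decide
            · intro x hx
              simp only [List.mem_append, List.mem_replicate, List.not_mem_nil, or_false] at hx
              obtain ⟨-,h⟩ := hx; omega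
          · have h4' := h4; rw [Bool.not_eq_true] at h4'
            rw [countP_zero_of_any_false h4', List.replicate_zero, List.nil_append, if_neg h4]
            decide
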